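-- pv_equiv track=rewrite | github.com/raresficiu1/Algorithms | CodeForces/Codeforces Round #704 (Div. 2)/B. Card Deck.py | solve
-- ===== SOURCE A (Python) =====
-- def solve(v):
--     lungime=len(v)
--     if(lungime>0):
--         max1 = max(v)
--         pos1 = v.index(max1)
--         remaining=solve(v[:pos1])
--         return v[pos1:] + remaining
--
--     else:
--         return ['a']
-- ===== SOURCE B (Python) =====
-- def solve(v):
--     # One left-to-right pass records the strict prefix maxima; the segments
--     # between consecutive records, emitted in reverse record order, are
--     # exactly the max-suffix segments A peels off recursively.  O(n) total.
--     records = []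
--     best = None
--     for i, x in enumerate(v):
--         if best is None or best < x:
--             best = x
--             records.append(i)
--     out = []
--     end = len(v)
--     for start in reversed(records):
--         out.extend(v[start:end])
--         end = start
--     out.append('a')
--     return out
-- ===== Notes on version B (the rewrite author's own statement) =====
-- stated objective: faster
-- what changed: Replaces the recursive max+index+slice peeling (repeated full scans) by a single left-to-right pass that records strict prefix maxima and then emits the segments between records in reverse order.
import Mathlib
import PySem

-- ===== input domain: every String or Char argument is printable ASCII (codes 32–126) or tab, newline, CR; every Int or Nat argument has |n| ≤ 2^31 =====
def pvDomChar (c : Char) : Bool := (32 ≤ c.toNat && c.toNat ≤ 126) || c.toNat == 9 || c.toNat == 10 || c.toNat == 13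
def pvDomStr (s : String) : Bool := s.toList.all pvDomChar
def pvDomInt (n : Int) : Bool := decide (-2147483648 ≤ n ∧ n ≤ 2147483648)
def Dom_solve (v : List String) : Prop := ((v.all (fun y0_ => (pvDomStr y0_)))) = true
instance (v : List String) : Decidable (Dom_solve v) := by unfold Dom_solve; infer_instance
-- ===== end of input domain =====

-- B replaces A's recursive max+index+slice peeling by a single pass recording
-- strict prefix maxima and emitting the segments between records in reverse order.

-- ===== PORT A =====
-- cited by the port's decreasing_by: the first index of the maximum is in range
theorem solve_idx_lt (v : List String) (h : 0 < v.length) :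
    ((PySem.List.index? v ((PySem.List.max? v (fun x => x)).getD "")).getD 0) < v.length := by
  have hne : v ≠ [] := by intro hv; simp [hv] at h
  obtain ⟨m, hm⟩ : ∃ m, PySem.List.max? v (fun x => x) = some m := by
    cases hmx : PySem.List.max? v (fun x => x) with
    | none => exact absurd ((PySem.List.max?_eq_none_iff v _).mp hmx) hne
    | some m => exact ⟨m, rfl⟩
  have hmem : m ∈ v := PySem.List.max?_mem hm
  obtain ⟨k, hk⟩ : ∃ k, PySem.List.index? v m = some k := by
    cases hix : PySem.List.index? v m with
    | none => exact absurd ((PySem.List.index?_eq_none_iff _ _).mp hix) (by simpa using hmem)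
    | some k => exact ⟨k, rfl⟩
  obtain ⟨hklt, -, -⟩ := PySem.List.getElem_of_index?_eq_some hk
  rw [hm, Option.getD_some, hk, Option.getD_some]
  exact hklt

def solve (v : List String) : List String :=
  if h : 0 < v.length then
    -- max? is some and index? is some here (nonempty list; Python's max/index succeed)
    let m := (PySem.List.max? v (fun x => x)).getD ""
    let p := (PySem.List.index? v m).getD 0
    PySem.List.slice v (some (p : Int)) none ++ solve (PySem.List.slice v none (some (p : Int)))
  else ["a"]
termination_by v.length
decreasing_by
  rw [PySem.List.slice_to_natCast]
  have := solve_idx_lt v h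
  simp only [List.length_take]
  omega

-- ===== PORT B =====
-- first loop of Source B: best/records accumulator over enumerate(v)
def altStep (st : Option String × List Int) (ix : Int × String) : Option String × List Int :=
  match st.1 with
  | none => (some ix.2, st.2 ++ [ix.1])
  | some b => if b < ix.2 then (some ix.2, st.2 ++ [ix.1]) else st

-- second loop of Source B: out/end accumulator over reversed(records)
def altEmit (v : List String) (st : List String × Int) (start : Int) : List String × Int :=
  (st.1 ++ PySem.List.slice v (some start) (some st.2), start)

def solve_alt (v : List String) : List String :=
  let records := ((PySem.List.enumerate v).foldl altStep (none, [])).2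
  let em := records.reverse.foldl (altEmit v) ([], (v.length : Int))
  em.1 ++ ["a"]

-- ===== PRECONDITION & SPEC =====
def Spec_solve (v : List String) (out : List String) : Prop := out = solve_alt v
instance (v : List String) (out : List String) : Decidable (Spec_solve v out) := by unfold Spec_solve; infer_instance

-- ===== CLAIM (what is proved, stated in full; the proofs are below) =====
def Claim_equal_solve : Prop := ∀ (v : List String), Dom_solve v → Spec_solve v (solve v)

-- ===== LEMMAS AND PROOFS =====

-- once the running max m dominates the rest of the list, the record state is frozen
theorem altStep_frozen (l : List String) (s : Int) (m : String) (rs : List Int)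
    (hdom : ∀ x ∈ l, x ≤ m) :
    (PySem.List.enumerate l s).foldl altStep (some m, rs) = (some m, rs) := by
  induction l generalizing s with
  | nil => simp [PySem.List.enumerate_nil]
  | cons x xs ih =>
    have hx : ¬ m < x := not_lt.mpr (hdom x (by simp))
    simp only [PySem.List.enumerate_cons, List.foldl_cons, altStep, hx]
    exact ih (s + 1) (fun y hy => hdom y (by simp [hy]))

-- the running max is either the initial one or an element of the list
theorem altStep_fst_mem (l : List String) (s : Int) (st : Option String × List Int) :
    ((PySem.List.enumerate l s).foldl altStep st).1 = st.1 ∨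
      ∃ m ∈ l, ((PySem.List.enumerate l s).foldl altStep st).1 = some m := by
  induction l generalizing s st with
  | nil => simp [PySem.List.enumerate_nil]
  | cons x xs ih =>
    simp only [PySem.List.enumerate_cons, List.foldl_cons]
    rcases ih (s + 1) (altStep st (s, x)) with h | ⟨m, hm, h⟩
    · rw [h]
      cases hst : st.1 with
      | none => exact Or.inr ⟨x, by simp, by simp [altStep, hst]⟩
      | some b =>
        by_cases hb : b < x
        · exact Or.inr ⟨x, by simp, by simp [altStep, hst, hb]⟩
        · exact Or.inl (by simp [altStep, hst, hb])
    · exact Or.inr ⟨m, by simp [hm], h⟩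

-- every recorded index is either pre-existing or in [s, s + len)
theorem altStep_snd_mem (l : List String) (s : Int) (st : Option String × List Int) (r : Int)
    (hr : r ∈ ((PySem.List.enumerate l s).foldl altStep st).2) :
    r ∈ st.2 ∨ (s ≤ r ∧ r < s + l.length) := by
  induction l generalizing s st with
  | nil => simp [PySem.List.enumerate_nil] at hr; exact Or.inl hr
  | cons x xs ih =>
    simp only [PySem.List.enumerate_cons, List.foldl_cons] at hr
    rcases ih (s + 1) (altStep st (s, x)) hr with h | ⟨h1, h2⟩
    · have : r ∈ st.2 ++ [s] ∨ r ∈ st.2 := by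
        cases hst : st.1 with
        | none => simp [altStep, hst] at h; exact Or.inl (by simpa using h)
        | some b =>
          by_cases hb : b < x
          · simp [altStep, hst, hb] at h; exact Or.inl (by simpa using h)
          · simp [altStep, hst, hb] at h; exact Or.inr h
      rcases this with h | h
      · rcases List.mem_append.mp h with h | h
        · exact Or.inl h
        · simp at h; subst h
          refine Or.inr ⟨le_refl r, ?_⟩
          simp only [List.length_cons]; push_cast; omega
      · exact Or.inl h
    · right; simp only [List.length_cons]; push_cast; omega
  
-- the record state of u ++ m :: w, m strictly above u and dominating w
theorem altStep_split (u w : List String) (m : String)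
    (hu : ∀ x ∈ u, x < m) (hw : ∀ x ∈ w, x ≤ m) :
    (PySem.List.enumerate (u ++ m :: w)).foldl altStep (none, []) =
      (some m, ((PySem.List.enumerate u).foldl altStep (none, [])).2 ++ [(u.length : Int)]) := by
  rw [PySem.List.enumerate_append, List.foldl_append]
  simp only [zero_add]
  have hstep : altStep ((PySem.List.enumerate u).foldl altStep (none, [])) ((u.length : Int), m) =
      (some m, ((PySem.List.enumerate u).foldl altStep (none, [])).2 ++ [(u.length : Int)]) := by
    rcases altStep_fst_mem u 0 (none, []) with h | ⟨c, hc, h⟩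
    · simp [altStep, h]
    · simp [altStep, h, hu c hc]
  rw [PySem.List.enumerate_cons, List.foldl_cons, hstep]
  exact altStep_frozen w _ m _ hw

-- the out-component of the emit fold factors out its initial value
theorem altEmit_out (v : List String) (rs : List Int) (O : List String) (e : Int) :
    rs.foldl (altEmit v) (O, e) =
      (O ++ (rs.foldl (altEmit v) ([], e)).1, (rs.foldl (altEmit v) ([], e)).2) := by
  induction rs generalizing O e with
  | nil => simp
  | cons r rs ih =>
    simp only [List.foldl_cons, altEmit, List.nil_append]
    rw [ih (O ++ _) r, ih (PySem.List.slice v _ _) r]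
    simp

-- slices bounded by p read the same data from v and from v.take p
theorem slice_take_eq (v : List String) (p : Nat) (a b : Int)
    (ha : 0 ≤ a) (hb : 0 ≤ b) (hbp : b ≤ (p : Int)) :
    PySem.List.slice (v.take p) (some a) (some b) = PySem.List.slice v (some a) (some b) := by
  rw [PySem.List.slice_toNat _ ha hb, PySem.List.slice_toNat _ ha hb]
  rw [List.drop_take, List.take_take]
  congr 1
  omega

-- the emit fold over records below p does not see v past p
theorem altEmit_congr_take (v : List String) (p : Nat) (rs : List Int) (O : List String) (e : Int)
    (he0 : 0 ≤ e) (hep : e ≤ (p : Int)) (hrs : ∀ r ∈ rs, 0 ≤ r ∧ r ≤ (p : Int)) :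
    rs.foldl (altEmit (v.take p)) (O, e) = rs.foldl (altEmit v) (O, e) := by
  induction rs generalizing O e with
  | nil => rfl
  | cons r rs ih =>
    obtain ⟨hr0, hrp⟩ := hrs r (by simp)
    simp only [List.foldl_cons, altEmit]
    rw [slice_take_eq v p r e hr0 he0 hep]
    exact ih _ r hr0 hrp (fun x hx => hrs x (by simp [hx]))

-- B's recurrence: solve_alt peels exactly the segment from the first index of the max
theorem solve_alt_rec (v : List String) (m : String) (k : Nat)
    (hm : PySem.List.max? v (fun x => x) = some m)
    (hk : PySem.List.index? v m = some k) :
    solve_alt v = PySem.List.slice v (some (k : Int)) none ++ solve_alt (v.take k) := by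
  obtain ⟨hklt, hvk, hfirst⟩ := PySem.List.getElem_of_index?_eq_some hk
  have hmax : ∀ y ∈ v, y ≤ m := PySem.List.max?_isMax hm
  have hlenu : (v.take k).length = k := by simp; omega
  have hv : v = v.take k ++ m :: v.drop (k + 1) := by
    conv_lhs => rw [← List.take_append_drop k v]
    rw [List.drop_eq_getElem_cons hklt, hvk]
  have hu : ∀ x ∈ v.take k, x < m := by
    intro x hx
    obtain ⟨j, hj, hxj⟩ := List.mem_iff_getElem.mp hx
    have hjk : j < k := by simpa [hlenu] using hj
    have hxv : x = v[j]'(by omega) := by rw [← hxj]; simp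
    refine lt_of_le_of_ne (hmax x (List.mem_of_mem_take hx)) ?_
    intro hxm
    exact hfirst j hjk (by rw [← hxv, ← hxm])
  have hw : ∀ x ∈ v.drop (k + 1), x ≤ m := fun x hx => hmax x (List.mem_of_mem_drop hx)
  have hrec : ((PySem.List.enumerate v).foldl altStep (none, [])).2 =
      ((PySem.List.enumerate (v.take k)).foldl altStep (none, [])).2 ++ [(k : Int)] := by
    conv_lhs => rw [hv]
    rw [altStep_split _ _ m hu hw, hlenu]
  have hrsu : ∀ r ∈ ((PySem.List.enumerate (v.take k)).foldl altStep (none, [])).2,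
      0 ≤ r ∧ r ≤ (k : Int) := by
    intro r hr
    rcases altStep_snd_mem (v.take k) 0 (none, []) r hr with h | ⟨h1, h2⟩
    · simp at h
    · rw [hlenu] at h2; constructor <;> omega
  unfold solve_alt
  rw [hrec]
  simp only [List.reverse_append, List.reverse_singleton, List.singleton_append, List.foldl_cons]
  have hfirstStep : altEmit v ([], (v.length : Int)) (k : Int) =
      (PySem.List.slice v (some (k : Int)) none, (k : Int)) := by
    unfold altEmit
    rw [PySem.List.slice_natCast, PySem.List.slice_from_natCast]
    simp only [List.nil_append]
    congr 1
    exact List.take_of_length_le (by simp)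
  rw [hfirstStep]
  rw [← altEmit_congr_take v k _ _ (k : Int) (by positivity) le_rfl
        (fun r hr => hrsu r (List.mem_reverse.mp hr))]
  rw [altEmit_out]
  rw [hlenu]
  simp

theorem solve_alt_nil : solve_alt [] = ["a"] := by
  unfold solve_alt
  simp [PySem.List.enumerate_nil]

theorem solve_eq_alt (v : List String) : solve v = solve_alt v := by
  suffices H : ∀ n (v : List String), v.length ≤ n → solve v = solve_alt v from H v.length v le_rfl
  intro n
  induction n with
  | zero =>
    intro v hv
    have hvnil : v = [] := List.length_eq_zero_iff.mp (Nat.le_zero.mp hv)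
    subst hvnil
    rw [solve, solve_alt_nil]
    simp
  | succ n ih =>
    intro v hv
    by_cases h : 0 < v.length
    · have hne : v ≠ [] := by intro hvnil; simp [hvnil] at h
      obtain ⟨m, hm⟩ : ∃ m, PySem.List.max? v (fun x => x) = some m := by
        cases hmx : PySem.List.max? v (fun x => x) with
        | none => exact absurd ((PySem.List.max?_eq_none_iff v _).mp hmx) hne
        | some m => exact ⟨m, rfl⟩
      obtain ⟨k, hk⟩ : ∃ k, PySem.List.index? v m = some k := by
        cases hix : PySem.List.index? v m with
        | none =>
            exact absurd ((PySem.List.index?_eq_none_iff _ _).mp hix) (by simpa using PySem.List.max?_mem hm)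
        | some k => exact ⟨k, rfl⟩
      obtain ⟨hklt, -, -⟩ := PySem.List.getElem_of_index?_eq_some hk
      rw [solve, dif_pos h]
      simp only [hm, Option.getD_some, hk]
      rw [PySem.List.slice_to_natCast]
      rw [ih (v.take k) (by simp; omega)]
      rw [solve_alt_rec v m k hm hk]
    · have hvnil : v = [] := by
        cases v with
        | nil => rfl
        | cons a l => simp at h
      subst hvnil
      rw [solve, solve_alt_nil]
      simp

-- ===== VERDICT (by name: the statement is the Claim_ definition above) =====
theorem solve_spec : Claim_equal_solve := by
  intro v _
  unfold Spec_solve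
  exact solve_eq_alt v
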